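-- pv_equiv track=rewrite | github.com/Harry-Chen/network-security-labs | lab4_tunet/xencode.py | ascii_to_int_array
-- ===== SOURCE A (Python) =====
-- def ord_at(msg, idx):
--     if len(msg) > idx:
--         return ord(msg[idx])
--     return 0
--
-- def ascii_to_int_array(msg, append_length):
--     l = len(msg)
--     pwd = []
--     for i in range(0, l, 4):
--         pwd.append(
--             ord_at(msg, i) | ord_at(msg, i + 1) << 8 | ord_at(msg, i + 2) << 16
--             | ord_at(msg, i + 3) << 24)
--     if append_length:
--         pwd.append(l)
--     return pwd
-- ===== SOURCE B (Python) =====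
-- def ascii_to_int_array(msg, append_length):
--     # single streaming pass: accumulate one 32-bit word, flush every 4 chars
--     pwd = []
--     word = 0
--     for idx, ch in enumerate(msg):
--         word |= ord(ch) << (8 * (idx % 4))
--         if idx % 4 == 3:
--             pwd.append(word)
--             word = 0
--     if len(msg) % 4 != 0:
--         pwd.append(word)
--     if append_length:
--         pwd.append(len(msg))
--     return pwd
-- ===== Notes on version B (the rewrite author's own statement) =====
-- stated objective: alternative
-- what changed: B replaces A's stride-4 index loop with four random ord_at lookups per word by a single streaming pass over the characters that accumulates one word with shift 8*(idx%4) and flushes it every fourth character, flushing the pending partial word at the end.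
import Mathlib
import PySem

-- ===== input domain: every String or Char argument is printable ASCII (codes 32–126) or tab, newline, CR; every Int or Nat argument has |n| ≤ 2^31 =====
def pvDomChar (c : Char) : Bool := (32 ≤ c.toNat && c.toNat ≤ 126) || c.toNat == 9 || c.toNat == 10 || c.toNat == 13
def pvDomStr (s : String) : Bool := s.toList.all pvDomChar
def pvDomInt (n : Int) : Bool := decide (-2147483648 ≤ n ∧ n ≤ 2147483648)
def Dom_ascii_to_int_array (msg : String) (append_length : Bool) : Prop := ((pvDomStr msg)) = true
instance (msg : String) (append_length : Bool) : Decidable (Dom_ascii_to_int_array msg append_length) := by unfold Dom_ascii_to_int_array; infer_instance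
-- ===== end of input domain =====

-- B streams the characters once, accumulating each 32-bit word with shift 8*(idx%4), instead of A's stride-4 index loop with four lookups per word (alternative decomposition, same O(n) cost).

-- ===== PORT A =====
-- ord(msg[idx]) for the in-range case; the `none` branch of pyGet? (IndexError) is unreachable for the nonnegative indices A passes, guarded by len(msg) > idx
def ord_at (msg : String) (idx : Int) : Int :=
  if PySem.Str.len msg > idx then
    match PySem.Str.pyGet? msg idx with
    | some c => (c.toNat : Int)
    | none => 0
  else 0

def ascii_to_int_array (msg : String) (append_length : Bool) : List Int :=
  let l : Int := PySem.Str.len msg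
  let pwd : List Int :=
    (PySem.List.pyRange 0 l 4).foldl (fun pwd i =>
      pwd ++ [PySem.Int.bor (PySem.Int.bor (PySem.Int.bor (ord_at msg i)
        ((ord_at msg (i + 1)) <<< 8)) ((ord_at msg (i + 2)) <<< 16)) ((ord_at msg (i + 3)) <<< 24)]) []
  if append_length then pwd ++ [l] else pwd

-- ===== PORT B =====
-- the for loop of Source B: state (pwd, word), idx from enumerate; shift exponent 8*(idx%4) is nonneg, so .toNat is exact
def altLoop : List Char → Int → Int → List Int → List Int × Int
  | [], _, word, pwd => (pwd, word)
  | c :: rest, idx, word, pwd =>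
    let word' := PySem.Int.bor word ((c.toNat : Int) <<< (8 * PySem.Int.mod idx 4).toNat)
    if PySem.Int.mod idx 4 == 3 then altLoop rest (idx + 1) 0 (pwd ++ [word'])
    else altLoop rest (idx + 1) word' pwd

def ascii_to_int_array_alt (msg : String) (append_length : Bool) : List Int :=
  let l : Int := PySem.Str.len msg
  let res := altLoop msg.toList 0 0 []
  let pwd := if PySem.Int.mod l 4 ≠ 0 then res.1 ++ [res.2] else res.1
  if append_length then pwd ++ [l] else pwd

-- ===== PRECONDITION & SPEC =====
def Spec_ascii_to_int_array (msg : String) (append_length : Bool) (out : List Int) : Prop := out = ascii_to_int_array_alt msg append_length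
instance (msg : String) (append_length : Bool) (out : List Int) : Decidable (Spec_ascii_to_int_array msg append_length out) := by unfold Spec_ascii_to_int_array; infer_instance

-- ===== CLAIM (what is proved, stated in full; the proofs are below) =====
def Claim_equal_ascii_to_int_array : Prop := ∀ (msg : String) (append_length : Bool), Dom_ascii_to_int_array msg append_length → Spec_ascii_to_int_array msg append_length (ascii_to_int_array msg append_length)

-- ===== LEMMAS AND PROOFS =====

-- `ord` of cs[n] with 0 beyond the end — the common value both loops produce
def ordN (cs : List Char) (n : Nat) : Int := ((cs[n]?).map (fun c => (c.toNat : Int))).getD 0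

-- the k-th packed word
def word4 (cs : List Char) (k : Nat) : Int :=
  PySem.Int.bor (PySem.Int.bor (PySem.Int.bor (ordN cs (4 * k))
    ((ordN cs (4 * k + 1)) <<< 8)) ((ordN cs (4 * k + 2)) <<< 16)) ((ordN cs (4 * k + 3)) <<< 24)

theorem pymod4 (j : Int) : PySem.Int.mod j 4 = j % 4 := by
  simp [PySem.Int.mod, Int.fmod_eq_emod]

theorem zero_bor (a : Int) : PySem.Int.bor 0 a = a := by
  rw [PySem.Int.bor_comm]; simp

theorem ord_at_natCast (msg : String) (n : Nat) : ord_at msg (n : Int) = ordN msg.toList n := by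
  simp only [ord_at, ordN, PySem.Str.len_eq, PySem.Str.pyGet?_natCast]
  by_cases h : n < msg.toList.length
  · rw [if_pos (by exact_mod_cast h), List.getElem?_eq_getElem h]
    simp
  · rw [if_neg (by omega), List.getElem?_eq_none (by omega)]
    simp

-- the streaming loop, started at any index ≡ 0 (mod 4) with an empty accumulator,
-- appends the full words and leaves the partial word of the remainder
theorem altLoop_run : ∀ (cs : List Char) (j : Int) (pwd : List Int), j % 4 = 0 →
    altLoop cs j 0 pwd =
      (pwd ++ (List.range (cs.length / 4)).map (word4 cs),
       if cs.length % 4 = 0 then 0 else word4 cs (cs.length / 4))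
  | [], j, pwd, h => by simp [altLoop]
  | [a], j, pwd, h => by
    have h0 : j % 4 = 0 := h
    have h1 : (j + 1) % 4 = 1 := by omega
    simp [altLoop, h0, word4, ordN, zero_bor]
  | [a, b], j, pwd, h => by
    have h1 : (j + 1) % 4 = 1 := by omega
    have h2 : (j + 1 + 1) % 4 = 2 := by omega
    simp [altLoop, h, h1, word4, ordN, zero_bor]
    rfl
  | [a, b, c], j, pwd, h => by
    have h1 : (j + 1) % 4 = 1 := by omega
    have h2 : (j + 1 + 1) % 4 = 2 := by omega
    have h3 : (j + 1 + 1 + 1) % 4 = 3 := by omega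
    simp [altLoop, h, h1, h2, word4, ordN, zero_bor]
    rfl
  | a :: b :: c :: d :: rest, j, pwd, h => by
    have h1 : (j + 1) % 4 = 1 := by omega
    have h2 : (j + 1 + 1) % 4 = 2 := by omega
    have h3 : (j + 1 + 1 + 1) % 4 = 3 := by omega
    have h4 : (j + 1 + 1 + 1 + 1) % 4 = 0 := by omega
    have ih := altLoop_run rest (j + 1 + 1 + 1 + 1)
      (pwd ++ [PySem.Int.bor (PySem.Int.bor (PySem.Int.bor (a.toNat : Int)
        ((b.toNat : Int) <<< 8)) ((c.toNat : Int) <<< 16)) ((d.toNat : Int) <<< 24)]) h4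
    simp only [altLoop, pymod4, h, h1, h2, h3] at *
    norm_num [zero_bor, show ((8:Int)).toNat = 8 from rfl, show ((16:Int)).toNat = 16 from rfl,
      show ((24:Int)).toNat = 24 from rfl] at ih ⊢
    refine ih.trans ?_
    have hord : ∀ m : Nat, ordN (a :: b :: c :: d :: rest) (m + 4) = ordN rest m := by
      intro m
      simp [ordN, show m + 4 = m + 1 + 1 + 1 + 1 from by omega]
    have hword : ∀ k : Nat, word4 (a :: b :: c :: d :: rest) (k + 1) = word4 rest k := by
      intro k
      unfold word4
      rw [show 4 * (k + 1) = 4 * k + 4 from by ring, show 4 * k + 4 + 1 = (4 * k + 1) + 4 from by ring,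
        show 4 * k + 4 + 2 = (4 * k + 2) + 4 from by ring, show 4 * k + 4 + 3 = (4 * k + 3) + 4 from by ring,
        hord, hord, hord, hord]
    have hw0 : word4 (a :: b :: c :: d :: rest) 0 =
        PySem.Int.bor (PySem.Int.bor (PySem.Int.bor (a.toNat : Int)
          ((b.toNat : Int) <<< 8)) ((c.toNat : Int) <<< 16)) ((d.toNat : Int) <<< 24) := by
      simp [word4, ordN]
    have hdiv : (rest.length + 1 + 1 + 1 + 1) / 4 = rest.length / 4 + 1 := by omega
    have hmod : (rest.length + 1 + 1 + 1 + 1) % 4 = rest.length % 4 := by omega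
    rw [hdiv, hmod, List.range_succ_eq_map]
    simp [hw0, hword, Function.comp_def]
termination_by cs => cs.length

-- ===== VERDICT (by name: the statement is the Claim_ definition above) =====
-- one packed word of A, rewritten through ordN
theorem A_word (msg : String) (k : Nat) :
    PySem.Int.bor (PySem.Int.bor (PySem.Int.bor (ord_at msg (0 + 4 * (k : Int)))
      ((ord_at msg (0 + 4 * (k : Int) + 1)) <<< 8)) ((ord_at msg (0 + 4 * (k : Int) + 2)) <<< 16))
      ((ord_at msg (0 + 4 * (k : Int) + 3)) <<< 24) = word4 msg.toList k := by
  have e0 : (0 + 4 * (k : Int)) = ((4 * k : Nat) : Int) := by push_cast; ring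
  have e1 : (0 + 4 * (k : Int) + 1) = ((4 * k + 1 : Nat) : Int) := by push_cast; ring
  have e2 : (0 + 4 * (k : Int) + 2) = ((4 * k + 2 : Nat) : Int) := by push_cast; ring
  have e3 : (0 + 4 * (k : Int) + 3) = ((4 * k + 3 : Nat) : Int) := by push_cast; ring
  rw [e3, e2, e1, e0, ord_at_natCast, ord_at_natCast, ord_at_natCast, ord_at_natCast, word4]

-- A's loop produces exactly the ceil(n/4) packed words
theorem A_closed (msg : String) (ap : Bool) :
    ascii_to_int_array msg ap =
      (let n := msg.toList.length
       let w := (List.range ((n + 3) / 4)).map (word4 msg.toList)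
       if ap then w ++ [(n : Int)] else w) := by
  simp only [ascii_to_int_array]
  rw [PySem.Str.len_eq, PySem.List.foldl_append_singleton_eq_map,
    PySem.List.pyRange_of_pos 0 (msg.toList.length : Int) (by norm_num), List.map_map]
  have hcnt : (if (0 : Int) < (msg.toList.length : Int)
      then (((msg.toList.length : Int) - 0 + 4 - 1) / 4).toNat else 0) = (msg.toList.length + 3) / 4 := by
    split_ifs with h <;> omega
  rw [hcnt]
  have hm : ∀ k ∈ List.range ((msg.toList.length + 3) / 4),
      PySem.Int.bor (PySem.Int.bor (PySem.Int.bor (ord_at msg (0 + 4 * (k : Int)))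
        ((ord_at msg (0 + 4 * (k : Int) + 1)) <<< 8)) ((ord_at msg (0 + 4 * (k : Int) + 2)) <<< 16))
        ((ord_at msg (0 + 4 * (k : Int) + 3)) <<< 24) = word4 msg.toList k :=
    fun k _ => A_word msg k
  cases ap
  · simp only [Bool.false_eq_true, if_false, List.nil_append]
    exact List.map_congr_left hm
  · simp only [if_true, List.nil_append]
    exact congrArg (fun t => t ++ [((msg.toList.length : Nat) : Int)]) (List.map_congr_left hm)

-- B's flush produces the same list
theorem B_closed (msg : String) (ap : Bool) :
    ascii_to_int_array_alt msg ap =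
      (let n := msg.toList.length
       let w := (List.range ((n + 3) / 4)).map (word4 msg.toList)
       if ap then w ++ [(n : Int)] else w) := by
  unfold ascii_to_int_array_alt
  rw [altLoop_run msg.toList 0 [] (by decide), PySem.Str.len_eq]
  set n := msg.toList.length with hn
  simp only [pymod4, List.nil_append]
  by_cases h : n % 4 = 0
  · have h' : ((n : Int) % 4 = 0) := by omega
    have hc : (n + 3) / 4 = n / 4 := by omega
    simp [h', hc]
  · have h' : ¬ ((n : Int) % 4 = 0) := by omega
    have hc : (n + 3) / 4 = n / 4 + 1 := by omega
    simp [h, h', hc, List.range_succ]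

theorem ascii_to_int_array_spec : Claim_equal_ascii_to_int_array := by
  intro msg ap _
  unfold Spec_ascii_to_int_array
  rw [A_closed, B_closed]
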